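-- pv_equiv track=rewrite | github.com/Michael52555/Research | Optimized.py | build_support_masks
-- ===== SOURCE A (Python) =====
-- def build_support_masks(mapping, stindic, indic, outdic, pos, size, total):
--     # variable id for each mapped entry
--     var_id = { (mapping[t][0]-1, mapping[t][1]-1): t for t in range(total) }
--
--     # precompute candidate lists once
--     cand = [[None]*size for _ in range(size)]
--     for i in range(size):
--         k = stindic[i]
--         for j in range(size):
--             if k == -1:
--                 cand[i][j] = (-1, [])
--                 continue
--             res = []
--             for l in outdic[k]:
--                 if l != i:
--                     res.append((l, j))
--             for m in indic[j]:
--                 res.append((k, m))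
--             cand[i][j] = (k, res)
--
--     support = [[0]*size for _ in range(size)]
--     state   = [[0]*size for _ in range(size)]  # 0=unseen, 1=visiting, 2=done
--
--     def dfs(i, j):
--         if state[i][j] == 2:
--             return support[i][j]
--         if state[i][j] == 1:
--             raise ValueError(f"cycle at {(i,j)}")
--
--         state[i][j] = 1
--
--         # forced-solved region (your pos rule)
--         if pos[j+1] > pos[i+1]:
--             support[i][j] = 0
--             state[i][j] = 2
--             return 0
--
--         # mapped variable cell
--         if (i, j) in var_id:
--             support[i][j] = 1 << var_id[(i, j)]
--             state[i][j] = 2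
--             return support[i][j]
--
--         k, deps = cand[i][j]
--         if k == -1:
--             # stays whatever constant you set; in your code it's 0 unless mapped
--             support[i][j] = 0
--             state[i][j] = 2
--             return 0
--
--         if not deps:
--             support[i][j] = 0
--             state[i][j] = 2
--             return 0
--
--         mask = 0
--         for (u, v) in deps:
--             mask ^= dfs(u, v)
--
--         support[i][j] = mask
--         state[i][j] = 2
--         return mask
--
--     for i in range(size):
--         for j in range(size):
--             if state[i][j] == 0:
--                 dfs(i, j)
--
--     return support
-- ===== SOURCE B (Python) =====
-- def build_support_masks(mapping, stindic, indic, outdic, pos, size, total):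
--     # Round-based fixpoint (Jacobi) iteration over the whole grid instead of a
--     # memoized depth-first search: no recursion, no visiting states, no stack.
--     var_id = { (mapping[t][0]-1, mapping[t][1]-1): t for t in range(total) }
--
--     def base(i, j):
--         # short-circuit value of a cell, or None if it depends on other cells
--         if pos[j+1] > pos[i+1]:
--             return 0
--         if (i, j) in var_id:
--             return 1 << var_id[(i, j)]
--         if stindic[i] == -1:
--             return 0
--         return None
--
--     def deps(i, j):
--         k = stindic[i]
--         return [(l, j) for l in outdic[k] if l != i] + [(k, m) for m in indic[j]]
--
--     val = [[0]*size for _ in range(size)]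
--     for _ in range(size*size + 1):
--         new = []
--         for i in range(size):
--             row = []
--             for j in range(size):
--                 b = base(i, j)
--                 if b is None:
--                     m = 0
--                     for (u, v) in deps(i, j):
--                         m ^= val[u][v]
--                     b = m
--                 row.append(b)
--             new.append(row)
--         if new == val:
--             break
--         val = new
--     return val
-- ===== Notes on version B (the rewrite author's own statement) =====
-- stated objective: alternative
-- what changed: replaced the memoized, cycle-detecting recursive DFS over support/state tables by a round-based fixpoint (Jacobi) iteration that recomputes every cell of the grid from the previous table until it stabilizes
import Mathlib
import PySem

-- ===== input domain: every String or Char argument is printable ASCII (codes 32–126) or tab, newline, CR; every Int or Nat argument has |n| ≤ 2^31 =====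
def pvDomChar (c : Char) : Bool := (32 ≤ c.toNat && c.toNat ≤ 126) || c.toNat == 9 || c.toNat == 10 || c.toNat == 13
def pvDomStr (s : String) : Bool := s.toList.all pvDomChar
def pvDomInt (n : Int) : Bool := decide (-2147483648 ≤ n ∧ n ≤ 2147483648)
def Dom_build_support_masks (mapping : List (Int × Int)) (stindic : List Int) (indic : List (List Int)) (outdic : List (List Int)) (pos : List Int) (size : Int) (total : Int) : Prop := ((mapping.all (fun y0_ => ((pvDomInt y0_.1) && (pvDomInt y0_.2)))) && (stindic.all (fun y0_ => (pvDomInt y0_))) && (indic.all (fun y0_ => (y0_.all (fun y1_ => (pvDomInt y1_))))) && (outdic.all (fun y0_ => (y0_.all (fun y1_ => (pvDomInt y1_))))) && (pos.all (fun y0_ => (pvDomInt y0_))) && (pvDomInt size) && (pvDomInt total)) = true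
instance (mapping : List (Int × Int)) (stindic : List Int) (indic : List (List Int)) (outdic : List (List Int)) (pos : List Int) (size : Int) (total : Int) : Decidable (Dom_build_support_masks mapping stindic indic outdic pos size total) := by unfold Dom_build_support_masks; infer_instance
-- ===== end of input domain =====

-- B replaces A's memoized cycle-detecting DFS by a round-based fixpoint (Jacobi) iteration
-- over the whole grid (objective: alternative algorithm, similar cost; not claimed faster).

-- ===== shared helpers (both Python versions contain these computations verbatim) =====

-- stindic[i]  (Python wrap semantics; the default is only taken where Python would raise, outside Pre_)
def pvK (stindic : List Int) (i : Int) : Int := PySem.List.pyGetD stindic i 0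

-- { (mapping[t][0]-1, mapping[t][1]-1): t for t in range(total) }
def pvVarId (mapping : List (Int × Int)) (total : Int) : PySem.Dict (Int × Int) Int :=
  (PySem.List.pyRange 0 total 1).foldl
    (fun d t =>
      let p := PySem.List.pyGetD mapping t (0, 0)
      d.insert (p.1 - 1, p.2 - 1) t)
    PySem.Dict.empty

-- the dependency list of cell (i,j):  [(l,j) for l in outdic[k] if l != i] + [(k,m) for m in indic[j]]
def pvDeps (stindic : List Int) (indic outdic : List (List Int)) (i j : Int) : List (Int × Int) :=
  ((PySem.List.pyGetD outdic (pvK stindic i) []).filter (fun l => l ≠ i)).map (fun l => (l, j)) ++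
    (PySem.List.pyGetD indic j []).map (fun m => (pvK stindic i, m))

-- the short-circuit value of a cell (pos rule / mapped variable / k == -1), in A's branch order
def pvBase? (varid : PySem.Dict (Int × Int) Int) (stindic pos : List Int) (i j : Int) : Option Int :=
  if PySem.List.pyGetD pos (j + 1) 0 > PySem.List.pyGetD pos (i + 1) 0 then some 0
  else
    match varid.get? (i, j) with
    | some t => some (Int.ofNat (1 <<< t.toNat))
    | none => if pvK stindic i = -1 then some 0 else none

-- ===== PORT A =====

-- the precomputed cand table (A's nested filling loops)
def pvCand (stindic : List Int) (indic outdic : List (List Int)) (size : Int) :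
    List (List (Int × List (Int × Int))) :=
  (PySem.List.pyRange 0 size 1).map fun i =>
    let k := pvK stindic i
    (PySem.List.pyRange 0 size 1).map fun j =>
      if k = -1 then ((-1 : Int), ([] : List (Int × Int)))
      else (k, ((PySem.List.pyGetD outdic k []).filter (fun l => l ≠ i)).map (fun l => (l, j)) ++
               (PySem.List.pyGetD indic j []).map (fun m => (k, m)))

-- Python's index semantics for the 2D support/state arrays: a negative index counts from
-- the end of its axis (the arrays have size rows/columns)
def pvWrap (size : Int) (c : Int × Int) : Int × Int :=
  (if c.1 < 0 then c.1 + size else c.1, if c.2 < 0 then c.2 + size else c.2)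

-- A's dfs; the support/state size×size arrays are modeled as total functions on cells,
-- read and written at the pvWrap-normalized index (exact wherever the Python does not
-- raise).  The fuel only guards the recursion and is never exhausted on Pre_ inputs; the
-- (0, st) returns on fuel-out and on state == 1 stand where the Python raises
-- (unreachable under Pre_).
def pvDfsA (size : Int) (pos : List Int) (varid : PySem.Dict (Int × Int) Int)
    (cand : List (List (Int × List (Int × Int)))) :
    Nat → Int → Int → (((Int × Int) → Int) × ((Int × Int) → Int)) →
      Int × (((Int × Int) → Int) × ((Int × Int) → Int))
  | 0, _, _, st => (0, st)
  | fuel + 1, i, j, st =>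
    if st.2 (pvWrap size (i, j)) = 2 then (st.1 (pvWrap size (i, j)), st)
    else if st.2 (pvWrap size (i, j)) = 1 then (0, st)   -- Python: raise ValueError (cycle)
    else
      let stt1 : (Int × Int) → Int := fun x => if x = pvWrap size (i, j) then 1 else st.2 x
      if PySem.List.pyGetD pos (j + 1) 0 > PySem.List.pyGetD pos (i + 1) 0 then
        (0, (fun x => if x = pvWrap size (i, j) then 0 else st.1 x,
             fun x => if x = pvWrap size (i, j) then 2 else stt1 x))
      else
        match varid.get? (i, j) with
        | some t =>
          let v : Int := Int.ofNat (1 <<< t.toNat)   -- 1 << var_id[(i,j)]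
          (v, (fun x => if x = pvWrap size (i, j) then v else st.1 x,
               fun x => if x = pvWrap size (i, j) then 2 else stt1 x))
        | none =>
          let kd := PySem.List.pyGetD (PySem.List.pyGetD cand i []) j (-1, [])
          if kd.1 = -1 then
            (0, (fun x => if x = pvWrap size (i, j) then 0 else st.1 x,
                 fun x => if x = pvWrap size (i, j) then 2 else stt1 x))
          else if kd.2 = [] then
            (0, (fun x => if x = pvWrap size (i, j) then 0 else st.1 x,
                 fun x => if x = pvWrap size (i, j) then 2 else stt1 x))
          else
            let r := kd.2.foldl
              (fun (acc : Int × (((Int × Int) → Int) × ((Int × Int) → Int))) uv =>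
                let p := pvDfsA size pos varid cand fuel uv.1 uv.2 acc.2
                (PySem.Int.bxor acc.1 p.1, p.2))
              (0, (st.1, stt1))
            (r.1, (fun x => if x = pvWrap size (i, j) then r.1 else r.2.1 x,
                   fun x => if x = pvWrap size (i, j) then 2 else r.2.2 x))

def build_support_masks (mapping : List (Int × Int)) (stindic : List Int) (indic : List (List Int)) (outdic : List (List Int)) (pos : List Int) (size : Int) (total : Int) : List (List Int) :=
  let varid := pvVarId mapping total
  let cand := pvCand stindic indic outdic size
  let st0 : ((Int × Int) → Int) × ((Int × Int) → Int) := (fun _ => 0, fun _ => 0)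
  let fin := (PySem.List.pyRange 0 size 1).foldl
    (fun st i =>
      (PySem.List.pyRange 0 size 1).foldl
        (fun st j => if st.2 (pvWrap size (i, j)) = 0 then (pvDfsA size pos varid cand ((size * size).toNat + 2) i j st).2 else st)
        st)
    st0
  (PySem.List.pyRange 0 size 1).map fun i =>
    (PySem.List.pyRange 0 size 1).map fun j => fin.1 (pvWrap size (i, j))

-- ===== PORT B =====

-- one Jacobi round: recompute every cell from the previous table
def pvStep (varid : PySem.Dict (Int × Int) Int) (stindic : List Int) (indic outdic : List (List Int))
    (pos : List Int) (size : Int) (val : List (List Int)) : List (List Int) :=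
  (PySem.List.pyRange 0 size 1).map fun i =>
    (PySem.List.pyRange 0 size 1).map fun j =>
      match pvBase? varid stindic pos i j with
      | some b => b
      | none =>
        (pvDeps stindic indic outdic i j).foldl
          (fun m uv => PySem.Int.bxor m (PySem.List.pyGetD (PySem.List.pyGetD val uv.1 []) uv.2 0)) 0

-- the round loop with its early exit ('if new == val: break')
def pvIter (varid : PySem.Dict (Int × Int) Int) (stindic : List Int) (indic outdic : List (List Int))
    (pos : List Int) (size : Int) : Nat → List (List Int) → List (List Int)
  | 0, val => val
  | n + 1, val =>
    let new := pvStep varid stindic indic outdic pos size val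
    if new = val then val else pvIter varid stindic indic outdic pos size n new

def build_support_masks_alt (mapping : List (Int × Int)) (stindic : List Int) (indic : List (List Int)) (outdic : List (List Int)) (pos : List Int) (size : Int) (total : Int) : List (List Int) :=
  let varid := pvVarId mapping total
  let val0 := (PySem.List.pyRange 0 size 1).map fun _ =>
    (PySem.List.pyRange 0 size 1).map fun _ => (0 : Int)
  pvIter varid stindic indic outdic pos size ((size * size).toNat + 1) val0

-- ===== PRECONDITION & SPEC =====

-- all grid cells, row-major
def pvGrid (size : Int) : List (Int × Int) :=
  (PySem.List.pyRange 0 size 1).flatMap fun i =>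
    (PySem.List.pyRange 0 size 1).map fun j => (i, j)

-- the acyclicity criterion on the INPUT dependency graph: a cell is 'solved at depth n' if it
-- short-circuits or all its dependency cells are solved at depth n-1.  This inspects only the
-- input lists (which cell depends on which) and computes no value of either program; 'every
-- grid cell is solved at depth size*size' says exactly that the dependency graph is acyclic
-- (equivalently, every cell has finite dependency depth), i.e. that A's DFS never raises
-- ValueError.
def pvSolved (varid : PySem.Dict (Int × Int) Int) (stindic : List Int) (indic outdic : List (List Int))
    (pos : List Int) : Nat → (Int × Int) → Bool
  | 0, _ => false
  | n + 1, c =>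
    (pvBase? varid stindic pos c.1 c.2).isSome ||
      (pvDeps stindic indic outdic c.1 c.2).all (fun d => pvSolved varid stindic indic outdic pos n d)

-- Pre_ excludes (a) inputs where A raises IndexError (too-short stindic/indic/pos/mapping, a row
-- index k outside outdic, a dependency cell outside the size×size grid) or ValueError (a dependency
-- cycle, i.e. some cell never becomes solved), and (b) inputs on which A still returns but only via
-- Python's negative-index wraparound, where a dependency cell such as (-1, j) aliases the state row
-- size-1 while being scored as a different cell — an accidental, traversal-order-dependent corner
-- that no caller would specify (see the cite in claim.json).
def Pre_build_support_masks (mapping : List (Int × Int)) (stindic : List Int) (indic : List (List Int)) (outdic : List (List Int)) (pos : List Int) (size : Int) (total : Int) : Prop :=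
  (total ≤ (mapping.length : Int) ∨ total ≤ 0) ∧
  (size ≤ 0 ∨
    (size ≤ (stindic.length : Int) ∧ size ≤ (indic.length : Int) ∧ size + 1 ≤ (pos.length : Int) ∧
      (∀ i ∈ PySem.List.pyRange 0 size 1,
        pvK stindic i = -1 ∨
          (-(outdic.length : Int) ≤ pvK stindic i ∧ pvK stindic i < (outdic.length : Int))))) ∧
  (∀ c ∈ pvGrid size,
    (pvBase? (pvVarId mapping total) stindic pos c.1 c.2).isSome = true ∨
      ∀ d ∈ pvDeps stindic indic outdic c.1 c.2, d ∈ pvGrid size) ∧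
  (∀ c ∈ pvGrid size,
    pvSolved (pvVarId mapping total) stindic indic outdic pos ((size * size).toNat) c = true)

instance (mapping : List (Int × Int)) (stindic : List Int) (indic : List (List Int)) (outdic : List (List Int)) (pos : List Int) (size : Int) (total : Int) : Decidable (Pre_build_support_masks mapping stindic indic outdic pos size total) := by
  unfold Pre_build_support_masks; infer_instance

def pvWitness_build_support_masks : (List (Int × Int)) × List Int × List (List Int) × List (List Int) × List Int × Int × Int :=
  ([(1, 1)], [0, -1], [[], [0]], [[1]], [0, 0, 0], 2, 1)

def Spec_build_support_masks (mapping : List (Int × Int)) (stindic : List Int) (indic : List (List Int)) (outdic : List (List Int)) (pos : List Int) (size : Int) (total : Int) (out : List (List Int)) : Prop := out = build_support_masks_alt mapping stindic indic outdic pos size total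
instance (mapping : List (Int × Int)) (stindic : List Int) (indic : List (List Int)) (outdic : List (List Int)) (pos : List Int) (size : Int) (total : Int) (out : List (List Int)) : Decidable (Spec_build_support_masks mapping stindic indic outdic pos size total out) := by unfold Spec_build_support_masks; infer_instance

-- ===== CLAIM (what is proved, stated in full; the proofs are below) =====
def Claim_equal_build_support_masks : Prop := ∀ (mapping : List (Int × Int)) (stindic : List Int) (indic : List (List Int)) (outdic : List (List Int)) (pos : List Int) (size : Int) (total : Int), Dom_build_support_masks mapping stindic indic outdic pos size total → Pre_build_support_masks mapping stindic indic outdic pos size total → Spec_build_support_masks mapping stindic indic outdic pos size total (build_support_masks mapping stindic indic outdic pos size total)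

-- ===== LEMMAS AND PROOFS =====

-- the idealized cell value after n rounds (pvH … (size²) is the common value of both ports)
def pvH (varid : PySem.Dict (Int × Int) Int) (stindic : List Int) (indic outdic : List (List Int))
    (pos : List Int) : Nat → (Int × Int) → Int
  | 0, _ => 0
  | n + 1, c =>
    match pvBase? varid stindic pos c.1 c.2 with
    | some b => b
    | none =>
      (pvDeps stindic indic outdic c.1 c.2).foldl
        (fun m d => PySem.Int.bxor m (pvH varid stindic indic outdic pos n d)) 0

theorem mem_pvGrid (size : Int) (c : Int × Int) :
    c ∈ pvGrid size ↔ 0 ≤ c.1 ∧ c.1 < size ∧ 0 ≤ c.2 ∧ c.2 < size := by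
  obtain ⟨i, j⟩ := c
  simp only [pvGrid, List.mem_flatMap, List.mem_map, PySem.List.mem_pyRange_one, Prod.mk.injEq]
  constructor
  · rintro ⟨a, ⟨ha0, ha1⟩, b, ⟨hb0, hb1⟩, rfl, rfl⟩; exact ⟨ha0, ha1, hb0, hb1⟩
  · rintro ⟨h1, h2, h3, h4⟩; exact ⟨i, ⟨h1, h2⟩, j, ⟨h3, h4⟩, rfl, rfl⟩

theorem pvSolved_mono (varid : PySem.Dict (Int × Int) Int) (stindic : List Int)
    (indic outdic : List (List Int)) (pos : List Int) (n : Nat) (c : Int × Int)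
    (h : pvSolved varid stindic indic outdic pos n c = true) :
    pvSolved varid stindic indic outdic pos (n + 1) c = true := by
  have hst : ∀ (m : Nat) (c' : Int × Int), pvSolved varid stindic indic outdic pos (m + 1) c' =
      ((pvBase? varid stindic pos c'.1 c'.2).isSome ||
        (pvDeps stindic indic outdic c'.1 c'.2).all
          (fun d => pvSolved varid stindic indic outdic pos m d)) := fun _ _ => rfl
  induction n generalizing c with
  | zero => simp [pvSolved] at h
  | succ n ih =>
    rw [hst] at h ⊢
    simp only [Bool.or_eq_true, List.all_eq_true] at h ⊢
    rcases h with h | h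
    · exact Or.inl h
    · exact Or.inr fun d hd => ih d (h d hd)

theorem pvH_stab (varid : PySem.Dict (Int × Int) Int) (stindic : List Int)
    (indic outdic : List (List Int)) (pos : List Int) (n : Nat) (c : Int × Int)
    (h : pvSolved varid stindic indic outdic pos n c = true) (m : Nat) (hm : n ≤ m) :
    pvH varid stindic indic outdic pos m c = pvH varid stindic indic outdic pos n c := by
  induction n generalizing c m with
  | zero => simp [pvSolved] at h
  | succ n ih =>
    obtain ⟨m', rfl⟩ : ∃ k, m = k + 1 := ⟨m - 1, by omega⟩
    have hm' : n ≤ m' := by omega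
    simp only [pvSolved, Bool.or_eq_true, List.all_eq_true] at h
    rcases hb : pvBase? varid stindic pos c.1 c.2 with _ | b
    · rcases h with h | h
      · simp [hb] at h
      · simp only [pvH, hb]
        refine PySem.List.foldl_congr_mem _ _ _ _ fun acc d hd => ?_
        rw [ih d (h d hd) m' hm']
    · simp [pvH, hb]

theorem pvCand_at (stindic : List Int) (indic outdic : List (List Int)) (size i j : Int)
    (hi0 : 0 ≤ i) (hi1 : i < size) (hj0 : 0 ≤ j) (hj1 : j < size) :
    PySem.List.pyGetD (PySem.List.pyGetD (pvCand stindic indic outdic size) i []) j ((-1 : Int), ([] : List (Int × Int))) =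
      if pvK stindic i = -1 then ((-1 : Int), ([] : List (Int × Int)))
      else (pvK stindic i, pvDeps stindic indic outdic i j) := by
  unfold pvCand
  rw [PySem.List.pyGetD_map_pyRange_of_nonneg _ _ _ _ hi0 hi1]
  simp only
  rw [PySem.List.pyGetD_map_pyRange_of_nonneg _ _ _ _ hj0 hj1]
  simp [pvDeps]

-- the grid table of a cell-value function
def pvTable (size : Int) (f : Int × Int → Int) : List (List Int) :=
  (PySem.List.pyRange 0 size 1).map fun i =>
    (PySem.List.pyRange 0 size 1).map fun j => f (i, j)

theorem pvTable_congr (size : Int) (f g : Int × Int → Int)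
    (h : ∀ c ∈ pvGrid size, f c = g c) : pvTable size f = pvTable size g := by
  unfold pvTable
  refine List.map_congr_left fun i hi => List.map_congr_left fun j hj => ?_
  rw [PySem.List.mem_pyRange_one] at hi hj
  exact h (i, j) ((mem_pvGrid size (i, j)).2 ⟨hi.1, hi.2, hj.1, hj.2⟩)

theorem pvTget_pvTable (size : Int) (f : Int × Int → Int) (c : Int × Int)
    (h : c ∈ pvGrid size) :
    PySem.List.pyGetD (PySem.List.pyGetD (pvTable size f) c.1 []) c.2 0 = f c := by
  rw [mem_pvGrid] at h
  unfold pvTable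
  rw [PySem.List.pyGetD_map_pyRange_of_nonneg _ _ _ _ h.1 h.2.1,
      PySem.List.pyGetD_map_pyRange_of_nonneg _ _ _ _ h.2.2.1 h.2.2.2]

theorem pvStep_table (varid : PySem.Dict (Int × Int) Int) (stindic : List Int)
    (indic outdic : List (List Int)) (pos : List Int) (size : Int)
    (Hg : ∀ c ∈ pvGrid size, (pvBase? varid stindic pos c.1 c.2).isSome = true ∨
      ∀ d ∈ pvDeps stindic indic outdic c.1 c.2, d ∈ pvGrid size) (n : Nat) :
    pvStep varid stindic indic outdic pos size
        (pvTable size (pvH varid stindic indic outdic pos n)) =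
      pvTable size (pvH varid stindic indic outdic pos (n + 1)) := by
  unfold pvStep
  conv_rhs => unfold pvTable
  refine List.map_congr_left fun i hi => List.map_congr_left fun j hj => ?_
  rw [PySem.List.mem_pyRange_one] at hi hj
  have hmem : (i, j) ∈ pvGrid size := (mem_pvGrid size (i, j)).2 ⟨hi.1, hi.2, hj.1, hj.2⟩
  rcases hb : pvBase? varid stindic pos i j with _ | b
  · have hdeps : ∀ d ∈ pvDeps stindic indic outdic i j, d ∈ pvGrid size := by
      rcases Hg (i, j) hmem with h | h
      · simp [hb] at h
      · exact h
    simp only [pvH, hb]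
    refine PySem.List.foldl_congr_mem _ _ _ _ fun acc d hd => ?_
    rw [pvTget_pvTable size _ d (hdeps d hd)]
  · simp [pvH, hb]

theorem pvTable_fix (varid : PySem.Dict (Int × Int) Int) (stindic : List Int)
    (indic outdic : List (List Int)) (pos : List Int) (size : Int)
    (Hg : ∀ c ∈ pvGrid size, (pvBase? varid stindic pos c.1 c.2).isSome = true ∨
      ∀ d ∈ pvDeps stindic indic outdic c.1 c.2, d ∈ pvGrid size) (k : Nat)
    (hfix : pvTable size (pvH varid stindic indic outdic pos (k + 1)) =
      pvTable size (pvH varid stindic indic outdic pos k)) :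
    ∀ m, k ≤ m → pvTable size (pvH varid stindic indic outdic pos m) =
      pvTable size (pvH varid stindic indic outdic pos k) := by
  intro m
  induction m with
  | zero => intro hm; obtain rfl : k = 0 := Nat.le_zero.mp hm; rfl
  | succ m ih =>
    intro hm
    rcases Nat.lt_or_ge k (m + 1) with h | h
    · have hkm : k ≤ m := by omega
      rw [← pvStep_table varid stindic indic outdic pos size Hg m, ih hkm,
          pvStep_table varid stindic indic outdic pos size Hg k, hfix]
    · obtain rfl : k = m + 1 := by omega
      rfl

theorem pvIter_table (varid : PySem.Dict (Int × Int) Int) (stindic : List Int)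
    (indic outdic : List (List Int)) (pos : List Int) (size : Int)
    (Hg : ∀ c ∈ pvGrid size, (pvBase? varid stindic pos c.1 c.2).isSome = true ∨
      ∀ d ∈ pvDeps stindic indic outdic c.1 c.2, d ∈ pvGrid size) :
    ∀ (r k : Nat), pvIter varid stindic indic outdic pos size r
        (pvTable size (pvH varid stindic indic outdic pos k)) =
      pvTable size (pvH varid stindic indic outdic pos (k + r)) := by
  intro r
  induction r with
  | zero => intro k; rfl
  | succ r ih =>
    intro k
    simp only [pvIter, pvStep_table varid stindic indic outdic pos size Hg k]
    by_cases hfix : pvTable size (pvH varid stindic indic outdic pos (k + 1)) =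
        pvTable size (pvH varid stindic indic outdic pos k)
    · rw [if_pos hfix,
        pvTable_fix varid stindic indic outdic pos size Hg k hfix (k + (r + 1)) (by omega)]
    · rw [if_neg hfix, ih (k + 1), show k + 1 + r = k + (r + 1) from by omega]

-- what one dfs call guarantees (value, gray set unchanged, done cells monotone and correct)
def pvPost (varid : PySem.Dict (Int × Int) Int) (stindic : List Int) (indic outdic : List (List Int))
    (pos : List Int) (NN : Nat) (stt : (Int × Int) → Int) (c : Int × Int)
    (r : Int × (((Int × Int) → Int) × ((Int × Int) → Int))) : Prop :=
  r.1 = pvH varid stindic indic outdic pos NN c ∧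
  (∀ x, (r.2.2 x = 1 ↔ stt x = 1)) ∧
  (∀ x, stt x = 2 → r.2.2 x = 2) ∧
  (∀ x, r.2.2 x = 2 → r.2.1 x = pvH varid stindic indic outdic pos NN x) ∧
  r.2.2 c = 2 ∧
  (∀ x, r.2.2 x = stt x ∨ r.2.2 x = 2)

theorem pvH_base (varid : PySem.Dict (Int × Int) Int) (stindic : List Int)
    (indic outdic : List (List Int)) (pos : List Int) (NN : Nat) (hNN : 1 ≤ NN)
    (c : Int × Int) (b : Int) (hb : pvBase? varid stindic pos c.1 c.2 = some b) :
    pvH varid stindic indic outdic pos NN c = b := by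
  obtain ⟨M, rfl⟩ : ∃ k, NN = k + 1 := ⟨NN - 1, by omega⟩
  simp [pvH, hb]

theorem pvH_none (varid : PySem.Dict (Int × Int) Int) (stindic : List Int)
    (indic outdic : List (List Int)) (pos : List Int) (NN n : Nat) (hn : n + 1 ≤ NN)
    (c : Int × Int) (hb : pvBase? varid stindic pos c.1 c.2 = none)
    (hdeps : ∀ d ∈ pvDeps stindic indic outdic c.1 c.2,
      pvSolved varid stindic indic outdic pos n d = true) :
    pvH varid stindic indic outdic pos NN c =
      (pvDeps stindic indic outdic c.1 c.2).foldl
        (fun m d => PySem.Int.bxor m (pvH varid stindic indic outdic pos NN d)) 0 := by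
  obtain ⟨M, rfl⟩ : ∃ k, NN = k + 1 := ⟨NN - 1, by omega⟩
  have hunf : pvH varid stindic indic outdic pos (M + 1) c =
      match pvBase? varid stindic pos c.1 c.2 with
      | some b => b
      | none =>
        (pvDeps stindic indic outdic c.1 c.2).foldl
          (fun m d => PySem.Int.bxor m (pvH varid stindic indic outdic pos M d)) 0 := rfl
  calc pvH varid stindic indic outdic pos (M + 1) c
      = (pvDeps stindic indic outdic c.1 c.2).foldl
          (fun m d => PySem.Int.bxor m (pvH varid stindic indic outdic pos M d)) 0 := by
        rw [hunf, hb]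
    _ = (pvDeps stindic indic outdic c.1 c.2).foldl
          (fun m d => PySem.Int.bxor m (pvH varid stindic indic outdic pos (M + 1) d)) 0 := by
        refine PySem.List.foldl_congr_mem _ _ _ _ fun acc d hd => ?_
        rw [pvH_stab varid stindic indic outdic pos n d (hdeps d hd) M (by omega),
            pvH_stab varid stindic indic outdic pos n d (hdeps d hd) (M + 1) (by omega)]

theorem pvDfsA_correct (varid : PySem.Dict (Int × Int) Int) (stindic : List Int)
    (indic outdic : List (List Int)) (pos : List Int) (size : Int) (NN : Nat)
    (Hg : ∀ c ∈ pvGrid size, (pvBase? varid stindic pos c.1 c.2).isSome = true ∨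
      ∀ d ∈ pvDeps stindic indic outdic c.1 c.2, d ∈ pvGrid size) :
    ∀ (n : Nat), n ≤ NN → ∀ (c : Int × Int), c ∈ pvGrid size →
      pvSolved varid stindic indic outdic pos n c = true →
      ∀ (sup stt : (Int × Int) → Int),
        (∀ x, stt x = 2 → sup x = pvH varid stindic indic outdic pos NN x) →
        (∀ g, stt g = 1 → pvSolved varid stindic indic outdic pos n g = false) →
        ∀ (fuel : Nat), n ≤ fuel →
        pvPost varid stindic indic outdic pos NN stt c
          (pvDfsA size pos varid (pvCand stindic indic outdic size) fuel c.1 c.2 (sup, stt)) := by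
  intro n
  induction n with
  | zero => intro _ c _ hsolved; simp [pvSolved] at hsolved
  | succ n ih =>
    intro hNN c hcgrid hsolved sup stt hinv hgray fuel hfuel
    by_cases hsn : pvSolved varid stindic indic outdic pos n c = true
    · refine ih (by omega) c hcgrid hsn sup stt hinv ?_ fuel (by omega)
      intro g hg
      rcases hh : pvSolved varid stindic indic outdic pos n g with _ | _
      · rfl
      · exact absurd (pvSolved_mono varid stindic indic outdic pos n g hh)
          (by simp [hgray g hg])
    · have hsnf : pvSolved varid stindic indic outdic pos n c = false := by
        revert hsn; cases pvSolved varid stindic indic outdic pos n c <;> simp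
      obtain ⟨i, j⟩ := c
      obtain ⟨hg1, hg2, hg3, hg4⟩ := (mem_pvGrid size (i, j)).1 hcgrid
      have hw : pvWrap size (i, j) = (i, j) := by
        unfold pvWrap
        dsimp only
        rw [if_neg (by omega), if_neg (by omega)]
      obtain ⟨fuel', rfl⟩ : ∃ k, fuel = k + 1 := ⟨fuel - 1, by omega⟩
      have hfuel' : n ≤ fuel' := by omega
      by_cases h2 : stt (i, j) = 2
      · simp only [pvDfsA, hw]
        rw [if_pos h2]
        exact ⟨hinv (i, j) h2, fun x => Iff.rfl, fun x h => h, fun x h => hinv x h, h2,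
          fun x => Or.inl rfl⟩
      · by_cases h1 : stt (i, j) = 1
        · exact absurd hsolved (by simp [hgray (i, j) h1])
        · -- a helper for the four short-circuit exits
          have finishPost : ∀ (b : Int),
              pvH varid stindic indic outdic pos NN (i, j) = b →
              pvPost varid stindic indic outdic pos NN stt (i, j)
                (b, (fun x => if x = (i, j) then b else sup x,
                     fun x => if x = (i, j) then 2 else if x = (i, j) then 1 else stt x)) := by
            intro b hb
            refine ⟨hb.symm, ?_, ?_, ?_, by simp, ?_⟩
            · intro x
              by_cases hx : x = (i, j)
              · subst hx; simp [h1]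
              · simp [hx]
            · intro x h
              by_cases hx : x = (i, j) <;> simp [hx, h]
            · intro x h
              by_cases hx : x = (i, j)
              · subst hx; simpa using hb.symm
              · simp only [if_neg hx] at h ⊢
                exact hinv x h
            · intro x
              by_cases hx : x = (i, j) <;> simp [hx]
          simp only [pvDfsA, hw]
          rw [if_neg h2, if_neg h1]
          by_cases hpos : PySem.List.pyGetD pos (j + 1) 0 > PySem.List.pyGetD pos (i + 1) 0
          · rw [if_pos hpos]
            exact finishPost 0 (pvH_base varid stindic indic outdic pos NN (by omega) (i, j) 0
              (by simp [pvBase?, hpos]))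
          · rw [if_neg hpos]
            rcases hv : varid.get? (i, j) with _ | t
            · -- not a mapped variable: look at cand
              have hbounds := (mem_pvGrid size (i, j)).1 hcgrid
              rw [pvCand_at stindic indic outdic size i j hbounds.1 hbounds.2.1
                hbounds.2.2.1 hbounds.2.2.2]
              by_cases hk : pvK stindic i = -1
              · rw [if_pos hk]
                exact finishPost 0 (pvH_base varid stindic indic outdic pos NN (by omega) (i, j) 0
                  (by simp [pvBase?, hpos, hv, hk]))
              · rw [if_neg hk]
                simp only
                rw [if_neg hk]
                have hbase : pvBase? varid stindic pos i j = none := by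
                  simp [pvBase?, hpos, hv, hk]
                have hdsolved : ∀ d ∈ pvDeps stindic indic outdic i j,
                    pvSolved varid stindic indic outdic pos n d = true := by
                  have h' := hsolved
                  rw [show pvSolved varid stindic indic outdic pos (n + 1) (i, j) =
                      ((pvBase? varid stindic pos i j).isSome ||
                        (pvDeps stindic indic outdic i j).all
                          (fun d => pvSolved varid stindic indic outdic pos n d)) from rfl,
                    hbase] at h'
                  simpa using h'
                have hdgrid : ∀ d ∈ pvDeps stindic indic outdic i j, d ∈ pvGrid size := by
                  rcases Hg (i, j) hcgrid with h | h
                  · rw [show ((i, j) : Int × Int).1 = i from rfl,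
                      show ((i, j) : Int × Int).2 = j from rfl] at h
                    simp [hbase] at h
                  · exact h
                by_cases hnil : pvDeps stindic indic outdic i j = []
                · rw [if_pos hnil]
                  refine finishPost 0 ?_
                  rw [pvH_none varid stindic indic outdic pos NN n hNN (i, j) hbase
                    (by rw [show ((i, j) : Int × Int).1 = i from rfl,
                          show ((i, j) : Int × Int).2 = j from rfl, hnil]; intro d hd; cases hd)]
                  rw [show ((i, j) : Int × Int).1 = i from rfl,
                      show ((i, j) : Int × Int).2 = j from rfl, hnil]
                  rfl
                · rw [if_neg hnil]
                  -- the dependency fold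
                  have hfold : ∀ (ds : List (Int × Int)),
                      (∀ d ∈ ds, pvSolved varid stindic indic outdic pos n d = true ∧
                        d ∈ pvGrid size) →
                      ∀ (a0 : Int) (sup2 stt2 : (Int × Int) → Int),
                        (∀ x, stt2 x = 2 → sup2 x = pvH varid stindic indic outdic pos NN x) →
                        (∀ g, stt2 g = 1 →
                          pvSolved varid stindic indic outdic pos n g = false) →
                        (ds.foldl
                            (fun (acc : Int × (((Int × Int) → Int) × ((Int × Int) → Int))) uv =>
                              (PySem.Int.bxor acc.1
                                  (pvDfsA size pos varid (pvCand stindic indic outdic size) fuel'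
                                    uv.1 uv.2 acc.2).1,
                                (pvDfsA size pos varid (pvCand stindic indic outdic size) fuel'
                                  uv.1 uv.2 acc.2).2))
                            (a0, (sup2, stt2))).1 =
                          ds.foldl
                            (fun m d =>
                              PySem.Int.bxor m (pvH varid stindic indic outdic pos NN d)) a0 ∧
                        (∀ x, ((ds.foldl
                            (fun (acc : Int × (((Int × Int) → Int) × ((Int × Int) → Int))) uv =>
                              (PySem.Int.bxor acc.1
                                  (pvDfsA size pos varid (pvCand stindic indic outdic size) fuel'
                                    uv.1 uv.2 acc.2).1,
                                (pvDfsA size pos varid (pvCand stindic indic outdic size) fuel'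
                                  uv.1 uv.2 acc.2).2))
                            (a0, (sup2, stt2))).2.2 x = 1 ↔ stt2 x = 1)) ∧
                        (∀ x, stt2 x = 2 → (ds.foldl
                            (fun (acc : Int × (((Int × Int) → Int) × ((Int × Int) → Int))) uv =>
                              (PySem.Int.bxor acc.1
                                  (pvDfsA size pos varid (pvCand stindic indic outdic size) fuel'
                                    uv.1 uv.2 acc.2).1,
                                (pvDfsA size pos varid (pvCand stindic indic outdic size) fuel'
                                  uv.1 uv.2 acc.2).2))
                            (a0, (sup2, stt2))).2.2 x = 2) ∧
                        (∀ x, (ds.foldl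
                            (fun (acc : Int × (((Int × Int) → Int) × ((Int × Int) → Int))) uv =>
                              (PySem.Int.bxor acc.1
                                  (pvDfsA size pos varid (pvCand stindic indic outdic size) fuel'
                                    uv.1 uv.2 acc.2).1,
                                (pvDfsA size pos varid (pvCand stindic indic outdic size) fuel'
                                  uv.1 uv.2 acc.2).2))
                            (a0, (sup2, stt2))).2.2 x = 2 →
                          (ds.foldl
                            (fun (acc : Int × (((Int × Int) → Int) × ((Int × Int) → Int))) uv =>
                              (PySem.Int.bxor acc.1
                                  (pvDfsA size pos varid (pvCand stindic indic outdic size) fuel'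
                                    uv.1 uv.2 acc.2).1,
                                (pvDfsA size pos varid (pvCand stindic indic outdic size) fuel'
                                  uv.1 uv.2 acc.2).2))
                            (a0, (sup2, stt2))).2.1 x =
                            pvH varid stindic indic outdic pos NN x) ∧
                        (∀ x, (ds.foldl
                            (fun (acc : Int × (((Int × Int) → Int) × ((Int × Int) → Int))) uv =>
                              (PySem.Int.bxor acc.1
                                  (pvDfsA size pos varid (pvCand stindic indic outdic size) fuel'
                                    uv.1 uv.2 acc.2).1,
                                (pvDfsA size pos varid (pvCand stindic indic outdic size) fuel'
                                  uv.1 uv.2 acc.2).2))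
                            (a0, (sup2, stt2))).2.2 x = stt2 x ∨
                          (ds.foldl
                            (fun (acc : Int × (((Int × Int) → Int) × ((Int × Int) → Int))) uv =>
                              (PySem.Int.bxor acc.1
                                  (pvDfsA size pos varid (pvCand stindic indic outdic size) fuel'
                                    uv.1 uv.2 acc.2).1,
                                (pvDfsA size pos varid (pvCand stindic indic outdic size) fuel'
                                  uv.1 uv.2 acc.2).2))
                            (a0, (sup2, stt2))).2.2 x = 2) := by
                    intro ds
                    induction ds with
                    | nil =>
                      intro _ a0 sup2 stt2 hinv2 hgray2
                      exact ⟨rfl, fun x => Iff.rfl, fun x h => h, fun x h => hinv2 x h,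
                        fun x => Or.inl rfl⟩
                    | cons d ds ihds =>
                      intro hds a0 sup2 stt2 hinv2 hgray2
                      obtain ⟨hdsolve, hdgrid'⟩ := hds d (List.mem_cons_self)
                      have hpost := ih (by omega) d hdgrid' hdsolve sup2 stt2 hinv2 hgray2
                        fuel' hfuel'
                      obtain ⟨hp1, hp2, hp3, hp4, hp5, hp6⟩ := hpost
                      have hrest := ihds (fun d' hd' => hds d' (List.mem_cons_of_mem d hd'))
                        (PySem.Int.bxor a0
                          (pvDfsA size pos varid (pvCand stindic indic outdic size) fuel'
                            d.1 d.2 (sup2, stt2)).1)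
                        (pvDfsA size pos varid (pvCand stindic indic outdic size) fuel'
                          d.1 d.2 (sup2, stt2)).2.1
                        (pvDfsA size pos varid (pvCand stindic indic outdic size) fuel'
                          d.1 d.2 (sup2, stt2)).2.2
                        (fun x h => hp4 x h)
                        (fun g hg => hgray2 g ((hp2 g).1 hg))
                      obtain ⟨hr1, hr2, hr3, hr4, hr5⟩ := hrest
                      refine ⟨?_, ?_, ?_, ?_, ?_⟩
                      · simp only [List.foldl_cons]
                        rw [hr1, hp1]
                      · intro x
                        simp only [List.foldl_cons]
                        exact (hr2 x).trans (hp2 x)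
                      · intro x h
                        simp only [List.foldl_cons]
                        exact hr3 x (hp3 x h)
                      · intro x h
                        simp only [List.foldl_cons] at h ⊢
                        exact hr4 x h
                      · intro x
                        simp only [List.foldl_cons]
                        rcases hr5 x with h | h
                        · rw [h]
                          exact hp6 x
                        · exact Or.inr h
                  have hgray1 : ∀ g, (fun x => if x = (i, j) then 1 else stt x) g = 1 →
                      pvSolved varid stindic indic outdic pos n g = false := by
                    intro g hg
                    by_cases hgij : g = (i, j)
                    · subst hgij; exact hsnf
                    · simp only [if_neg hgij] at hg
                      rcases hh : pvSolved varid stindic indic outdic pos n g with _ | _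
                      · rfl
                      · exact absurd (pvSolved_mono varid stindic indic outdic pos n g hh)
                          (by simp [hgray g hg])
                  have hf := hfold (pvDeps stindic indic outdic i j)
                    (fun d hd => ⟨hdsolved d hd, hdgrid d hd⟩) 0 sup
                    (fun x => if x = (i, j) then 1 else stt x)
                    (by
                      intro x h
                      by_cases hx : x = (i, j)
                      · subst hx; simp at h
                      · simp only [if_neg hx] at h
                        exact hinv x h)
                    hgray1
                  obtain ⟨hf1, hf2, hf3, hf4, hf5⟩ := hf
                  have hHval : pvH varid stindic indic outdic pos NN (i, j) =
                      (pvDeps stindic indic outdic i j).foldl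
                        (fun m d => PySem.Int.bxor m (pvH varid stindic indic outdic pos NN d))
                        0 :=
                    pvH_none varid stindic indic outdic pos NN n hNN (i, j) hbase hdsolved
                  refine ⟨?_, ?_, ?_, ?_, by simp, ?_⟩
                  · simpa [hHval] using hf1.symm ▸ rfl
                  · intro x
                    by_cases hx : x = (i, j)
                    · subst hx; simp [h1]
                    · simp only [if_neg hx]
                      rw [hf2 x]
                      simp [hx]
                  · intro x h
                    by_cases hx : x = (i, j)
                    · simp [hx]
                    · simp only [if_neg hx]
                      exact hf3 x (by simp [hx, h])
                  · intro x h
                    dsimp only at h ⊢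
                    by_cases hx : x = (i, j)
                    · subst hx
                      rw [if_pos rfl, hf1, hHval]
                    · simp only [if_neg hx] at h ⊢
                      exact hf4 x h
                  · intro x
                    by_cases hx : x = (i, j)
                    · simp [hx]
                    · simp only [if_neg hx]
                      rcases hf5 x with h | h
                      · rw [h]; simp [hx]
                      · exact Or.inr h
            · -- mapped variable cell
              exact finishPost (Int.ofNat (1 <<< t.toNat))
                (pvH_base varid stindic indic outdic pos NN (by omega) (i, j) _
                  (by simp [pvBase?, hpos, hv]))

theorem pvLoop (varid : PySem.Dict (Int × Int) Int) (stindic : List Int)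
    (indic outdic : List (List Int)) (pos : List Int) (size : Int) (NN : Nat)
    (Hg : ∀ c ∈ pvGrid size, (pvBase? varid stindic pos c.1 c.2).isSome = true ∨
      ∀ d ∈ pvDeps stindic indic outdic c.1 c.2, d ∈ pvGrid size) :
    ∀ (cs : List (Int × Int)),
      (∀ c ∈ cs, c ∈ pvGrid size ∧ pvSolved varid stindic indic outdic pos NN c = true) →
      ∀ (sup stt : (Int × Int) → Int),
        (∀ x, stt x = 2 → sup x = pvH varid stindic indic outdic pos NN x) →
        (∀ x, stt x = 0 ∨ stt x = 2) →
        ∀ (fuel : Nat), NN ≤ fuel →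
        (∀ x, (cs.foldl
            (fun (st : ((Int × Int) → Int) × ((Int × Int) → Int)) c =>
              if st.2 (pvWrap size (c.1, c.2)) = 0 then
                (pvDfsA size pos varid (pvCand stindic indic outdic size) fuel c.1 c.2 st).2
              else st) (sup, stt)).2 x = 2 →
          (cs.foldl
            (fun (st : ((Int × Int) → Int) × ((Int × Int) → Int)) c =>
              if st.2 (pvWrap size (c.1, c.2)) = 0 then
                (pvDfsA size pos varid (pvCand stindic indic outdic size) fuel c.1 c.2 st).2
              else st) (sup, stt)).1 x = pvH varid stindic indic outdic pos NN x) ∧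
        (∀ x, (cs.foldl
            (fun (st : ((Int × Int) → Int) × ((Int × Int) → Int)) c =>
              if st.2 (pvWrap size (c.1, c.2)) = 0 then
                (pvDfsA size pos varid (pvCand stindic indic outdic size) fuel c.1 c.2 st).2
              else st) (sup, stt)).2 x = 0 ∨
          (cs.foldl
            (fun (st : ((Int × Int) → Int) × ((Int × Int) → Int)) c =>
              if st.2 (pvWrap size (c.1, c.2)) = 0 then
                (pvDfsA size pos varid (pvCand stindic indic outdic size) fuel c.1 c.2 st).2
              else st) (sup, stt)).2 x = 2) ∧
        (∀ c ∈ cs, (cs.foldl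
            (fun (st : ((Int × Int) → Int) × ((Int × Int) → Int)) c =>
              if st.2 (pvWrap size (c.1, c.2)) = 0 then
                (pvDfsA size pos varid (pvCand stindic indic outdic size) fuel c.1 c.2 st).2
              else st) (sup, stt)).2 c = 2) ∧
        (∀ x, stt x = 2 → (cs.foldl
            (fun (st : ((Int × Int) → Int) × ((Int × Int) → Int)) c =>
              if st.2 (pvWrap size (c.1, c.2)) = 0 then
                (pvDfsA size pos varid (pvCand stindic indic outdic size) fuel c.1 c.2 st).2
              else st) (sup, stt)).2 x = 2) := by
  intro cs
  induction cs with
  | nil =>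
    intro _ sup stt hinv hz fuel hfuel
    exact ⟨fun x h => hinv x h, hz, fun c hc => absurd hc (List.not_mem_nil), fun x h => h⟩
  | cons c cs ihcs =>
    intro hcs sup stt hinv hz fuel hfuel
    obtain ⟨hcgrid, hcsolved⟩ := hcs c (List.mem_cons_self)
    obtain ⟨hb1, hb2, hb3, hb4⟩ := (mem_pvGrid size c).1 hcgrid
    have hwc : pvWrap size (c.1, c.2) = (c.1, c.2) := by
      unfold pvWrap
      dsimp only
      rw [if_neg (by omega), if_neg (by omega)]
    have hgray : ∀ g, stt g = 1 → pvSolved varid stindic indic outdic pos NN g = false := by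
      intro g hg
      rcases hz g with h | h <;> rw [hg] at h <;> exact absurd h (by decide)
    by_cases hc0 : stt (c.1, c.2) = 0
    · have hpost := pvDfsA_correct varid stindic indic outdic pos size NN Hg NN le_rfl c
        hcgrid hcsolved sup stt hinv hgray fuel hfuel
      obtain ⟨hp1, hp2, hp3, hp4, hp5, hp6⟩ := hpost
      have hz' : ∀ x,
          (pvDfsA size pos varid (pvCand stindic indic outdic size) fuel c.1 c.2 (sup, stt)).2.2 x = 0 ∨
          (pvDfsA size pos varid (pvCand stindic indic outdic size) fuel c.1 c.2 (sup, stt)).2.2 x = 2 := by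
        intro x
        rcases hp6 x with h | h
        · rw [h]; exact hz x
        · exact Or.inr h
      have hrest := ihcs (fun c' hc' => hcs c' (List.mem_cons_of_mem c hc'))
        (pvDfsA size pos varid (pvCand stindic indic outdic size) fuel c.1 c.2 (sup, stt)).2.1
        (pvDfsA size pos varid (pvCand stindic indic outdic size) fuel c.1 c.2 (sup, stt)).2.2
        (fun x h => hp4 x h) hz' fuel hfuel
      obtain ⟨hr1, hr2, hr3, hr4⟩ := hrest
      simp only [List.foldl_cons, hwc]
      rw [if_pos hc0]
      refine ⟨hr1, hr2, ?_, fun x h => hr4 x (hp3 x h)⟩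
      intro c' hc'
      rcases List.mem_cons.mp hc' with rfl | h
      · exact hr4 (c'.1, c'.2) (by simpa using hp5)
      · exact hr3 c' h
    · have hc2 : stt (c.1, c.2) = 2 := by
        rcases hz (c.1, c.2) with h | h
        · exact absurd h hc0
        · exact h
      have hrest := ihcs (fun c' hc' => hcs c' (List.mem_cons_of_mem c hc')) sup stt hinv hz
        fuel hfuel
      obtain ⟨hr1, hr2, hr3, hr4⟩ := hrest
      simp only [List.foldl_cons, hwc]
      rw [if_neg hc0]
      refine ⟨hr1, hr2, ?_, fun x h => hr4 x h⟩
      intro c' hc'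
      rcases List.mem_cons.mp hc' with rfl | h
      · exact hr4 (c'.1, c'.2) hc2
      · exact hr3 c' h

-- ===== VERDICT (by name: the statement is the Claim_ definition above) =====
theorem build_support_masks_spec : Claim_equal_build_support_masks := by
  unfold Claim_equal_build_support_masks
  intro mapping stindic indic outdic pos size total _ hpre
  obtain ⟨-, -, Hg, Hsolved⟩ := hpre
  unfold Spec_build_support_masks build_support_masks build_support_masks_alt
  have hbridge :
      (PySem.List.pyRange 0 size 1).foldl
        (fun (st : ((Int × Int) → Int) × ((Int × Int) → Int)) i =>
          (PySem.List.pyRange 0 size 1).foldl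
            (fun st j =>
              if st.2 (pvWrap size (i, j)) = 0 then
                (pvDfsA size pos (pvVarId mapping total) (pvCand stindic indic outdic size)
                  ((size * size).toNat + 2) i j st).2
              else st) st)
        (fun _ => 0, fun _ => 0) =
      (pvGrid size).foldl
        (fun (st : ((Int × Int) → Int) × ((Int × Int) → Int)) c =>
          if st.2 (pvWrap size (c.1, c.2)) = 0 then
            (pvDfsA size pos (pvVarId mapping total) (pvCand stindic indic outdic size)
              ((size * size).toNat + 2) c.1 c.2 st).2
          else st)
        (fun _ => 0, fun _ => 0) := by
    simp only [pvGrid, List.foldl_flatMap, List.foldl_map]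
  have hloop := pvLoop (pvVarId mapping total) stindic indic outdic pos size
    ((size * size).toNat) Hg (pvGrid size) (fun c hc => ⟨hc, Hsolved c hc⟩)
    (fun _ => 0) (fun _ => 0) (fun x h => by simp at h) (fun x => Or.inl rfl)
    ((size * size).toNat + 2) (by omega)
  obtain ⟨hl1, _, hl3, _⟩ := hloop
  calc
    (PySem.List.pyRange 0 size 1).map
        (fun i => (PySem.List.pyRange 0 size 1).map (fun j =>
          ((PySem.List.pyRange 0 size 1).foldl
            (fun (st : ((Int × Int) → Int) × ((Int × Int) → Int)) i =>
              (PySem.List.pyRange 0 size 1).foldl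
                (fun st j =>
                  if st.2 (pvWrap size (i, j)) = 0 then
                    (pvDfsA size pos (pvVarId mapping total) (pvCand stindic indic outdic size)
                      ((size * size).toNat + 2) i j st).2
                  else st) st)
            (fun _ => 0, fun _ => 0)).1 (pvWrap size (i, j))))
      = pvTable size (pvH (pvVarId mapping total) stindic indic outdic pos
          ((size * size).toNat)) := by
        rw [hbridge]
        conv_rhs => unfold pvTable
        refine List.map_congr_left fun i hi => List.map_congr_left fun j hj => ?_
        rw [PySem.List.mem_pyRange_one] at hi hj
        have hmem : (i, j) ∈ pvGrid size := (mem_pvGrid size (i, j)).2 ⟨hi.1, hi.2, hj.1, hj.2⟩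
        have hw : pvWrap size (i, j) = (i, j) := by
          unfold pvWrap
          dsimp only
          rw [if_neg (by omega), if_neg (by omega)]
        rw [hw]
        exact hl1 (i, j) (hl3 (i, j) hmem)
    _ = pvTable size (pvH (pvVarId mapping total) stindic indic outdic pos
          ((size * size).toNat + 1)) := by
        refine pvTable_congr size _ _ fun c hc => ?_
        exact (pvH_stab (pvVarId mapping total) stindic indic outdic pos
          ((size * size).toNat) c (Hsolved c hc) ((size * size).toNat + 1) (by omega)).symm
    _ = pvIter (pvVarId mapping total) stindic indic outdic pos size
          ((size * size).toNat + 1)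
          ((PySem.List.pyRange 0 size 1).map fun _ =>
            (PySem.List.pyRange 0 size 1).map fun _ => (0 : Int)) := by
        rw [show ((PySem.List.pyRange 0 size 1).map fun _ =>
            (PySem.List.pyRange 0 size 1).map fun _ => (0 : Int)) =
          pvTable size (pvH (pvVarId mapping total) stindic indic outdic pos 0) from rfl]
        rw [pvIter_table (pvVarId mapping total) stindic indic outdic pos size Hg
          ((size * size).toNat + 1) 0]
        rw [show (0 + ((size * size).toNat + 1)) = (size * size).toNat + 1 from by omega]
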